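-- pv_equiv track=rewrite | github.com/Danr0/boolfunc | main.py | contiguity
-- ===== SOURCE A (Python) =====
-- def contiguity(a,b):
--     t = str(int(a)+int(b))
--     s = 0
--     for i in range(0,len(t)):
--         if t[i] == '1':
--                 s+=1
--     if (s==1):
--         return True
--     return False
-- ===== SOURCE B (Python) =====
-- def contiguity(a, b):
--     n = abs(int(a) + int(b))
--     c = 0
--     while True:
--         if n % 10 == 1:
--             c += 1
--         n //= 10
--         if n == 0:
--             break
--     return c == 1
-- ===== Notes on version B (the rewrite author's own statement) =====
-- stated objective: idiomatic
-- what changed: B counts 1-digits by arithmetic peeling (n % 10 / n //= 10 do-while on abs(a+b)) instead of building the decimal string and scanning it by index.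
import Mathlib
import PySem

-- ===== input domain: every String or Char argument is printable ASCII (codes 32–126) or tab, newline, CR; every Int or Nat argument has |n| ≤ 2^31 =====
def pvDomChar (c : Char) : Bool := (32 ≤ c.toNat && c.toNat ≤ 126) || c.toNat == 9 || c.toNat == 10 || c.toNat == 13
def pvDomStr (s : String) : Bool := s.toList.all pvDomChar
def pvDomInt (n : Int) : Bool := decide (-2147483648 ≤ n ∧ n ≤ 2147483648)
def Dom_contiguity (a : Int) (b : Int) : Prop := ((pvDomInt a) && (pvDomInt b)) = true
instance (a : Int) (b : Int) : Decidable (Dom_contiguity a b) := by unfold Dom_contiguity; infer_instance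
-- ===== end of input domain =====

-- B replaces A's string scan by an arithmetic do-while counting 1-digits of |a+b| (idiomatic; same cost).

-- ===== PORT A =====
-- literal port: build str(a+b), loop i over range(0, len t) counting t[i] == '1'
def contiguity (a : Int) (b : Int) : Bool :=
  let t := PySem.Int.toChars (a + b)
  let s := (PySem.List.pyRange 0 (PySem.List.len t) 1).foldl
    (fun s i => if PySem.List.pyGetD t i ' ' == '1' then s + 1 else s) (0 : Int)
  if s == 1 then true else false

-- ===== PORT B =====
-- the do-while of Source B: count digit, n //= 10, stop when n == 0; c is the running counter
def countOnesLoop (c : Nat) (n : Nat) : Nat :=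
  let c' := if n % 10 = 1 then c + 1 else c
  let n' := n / 10
  if _h : n' = 0 then c' else countOnesLoop c' n'
termination_by n
decreasing_by exact Nat.div_lt_self (by omega) (by omega)

def contiguity_alt (a : Int) (b : Int) : Bool :=
  countOnesLoop 0 (a + b).natAbs == 1

-- ===== PRECONDITION & SPEC =====
def Spec_contiguity (a : Int) (b : Int) (out : Bool) : Prop := out = contiguity_alt a b
instance (a : Int) (b : Int) (out : Bool) : Decidable (Spec_contiguity a b out) := by unfold Spec_contiguity; infer_instance

-- ===== CLAIM (what is proved, stated in full; the proofs are below) =====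
def Claim_equal_contiguity : Prop := ∀ (a : Int) (b : Int), Dom_contiguity a b → Spec_contiguity a b (contiguity a b)

-- ===== LEMMAS AND PROOFS =====

lemma digitChar_eq_one (n : Nat) : ((n % 10).digitChar == '1') = decide (n % 10 = 1) := by
  have h : n % 10 < 10 := by omega
  set m := n % 10 with hm
  interval_cases m <;> rfl

lemma countP_toDigitsCore (fuel n : Nat) (ds : List Char) (hf : n < fuel) :
    (Nat.toDigitsCore 10 fuel n ds).countP (· == '1')
      = countOnesLoop (ds.countP (· == '1')) n := by
  induction fuel generalizing n ds with
  | zero => omega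
  | succ f ih =>
    rw [Nat.toDigitsCore, countOnesLoop]
    by_cases h : n / 10 = 0
    · simp only [h]
      by_cases h1 : n % 10 = 1
      · simp [h1, Nat.digitChar]
      · simp [digitChar_eq_one, h1]
    · rw [if_neg h, dif_neg h,
        ih (n / 10) ((n % 10).digitChar :: ds) (by
          have : n / 10 < n := Nat.div_lt_self (by omega) (by omega)
          omega)]
      congr 1
      simp only [List.countP_cons, digitChar_eq_one]
      by_cases h1 : n % 10 = 1 <;> simp [h1]

lemma countP_toChars (m : Int) :
    (PySem.Int.toChars m).countP (· == '1') = countOnesLoop 0 m.natAbs := by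
  rw [PySem.Int.toChars]
  by_cases hm : m < 0
  · rw [if_pos hm, List.countP_cons, Nat.toDigits]
    have := countP_toDigitsCore (m.natAbs + 1) m.natAbs [] (by omega)
    simp only [List.countP_nil] at this
    simp [this]
  · rw [if_neg hm, Nat.toDigits]
    have := countP_toDigitsCore (m.toNat + 1) m.toNat [] (by omega)
    simp only [List.countP_nil] at this
    rw [this]
    congr 1
    omega

lemma contiguity_count (a b : Int) :
    contiguity a b = (((countOnesLoop 0 (a + b).natAbs : Nat) : Int) == 1) := by
  unfold contiguity
  dsimp only
  rw [PySem.List.foldl_count_if]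
  have h1 : List.countP (fun i => PySem.List.pyGetD (PySem.Int.toChars (a + b)) i ' ' == '1')
      (PySem.List.pyRange 0 (PySem.List.len (PySem.Int.toChars (a + b))))
      = countOnesLoop 0 (a + b).natAbs := by
    rw [show (fun i => PySem.List.pyGetD (PySem.Int.toChars (a + b)) i ' ' == '1')
        = ((· == '1') ∘ (fun j => PySem.List.pyGetD (PySem.Int.toChars (a + b)) j ' ')) from rfl,
      ← List.countP_map, PySem.List.map_pyGetD_pyRange_zero, countP_toChars]
  rw [h1]
  rcases eq_or_ne (countOnesLoop 0 (a + b).natAbs) 1 with h | h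
  · simp [h]
  · have hc : ((countOnesLoop 0 (a + b).natAbs : Nat) : Int) ≠ 1 := by exact_mod_cast h
    simp [hc]

-- ===== VERDICT (by name: the statement is the Claim_ definition above) =====
theorem contiguity_spec : Claim_equal_contiguity := by
  intro a b _
  unfold Spec_contiguity contiguity_alt
  rw [contiguity_count]
  rcases eq_or_ne (countOnesLoop 0 (a + b).natAbs) 1 with h | h <;> simp [h]
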